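-- pv_equiv track=rewrite | github.com/BryanValeriano/marathon | codeforces/264div2/b.py | solve
-- ===== SOURCE A (Python) =====
-- from typing import List
--
-- def solve(V: List[int]) -> int:
--     energy = 0
--     last = 0
--     ans = 0
--
--     for x in V:
--         energy += last - x
--         last = x
--         ans += max(0, -energy)
--         energy = max(0, energy)
--
--     return ans
-- ===== SOURCE B (Python) =====
-- from typing import List
--
-- def solve(V: List[int]) -> int:
--     # Closed form: A's clamped-deficit accumulator is a running maximum floored at 0.
--     return max([0] + V)
-- ===== Notes on version B (the rewrite author's own statement) =====
-- stated objective: simpler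
-- what changed: Replaced the three-variable clamped energy/deficit accumulator loop by a closed form: the maximum of the list seeded with zero, justified by the loop invariant energy = ans - last.
import Mathlib
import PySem

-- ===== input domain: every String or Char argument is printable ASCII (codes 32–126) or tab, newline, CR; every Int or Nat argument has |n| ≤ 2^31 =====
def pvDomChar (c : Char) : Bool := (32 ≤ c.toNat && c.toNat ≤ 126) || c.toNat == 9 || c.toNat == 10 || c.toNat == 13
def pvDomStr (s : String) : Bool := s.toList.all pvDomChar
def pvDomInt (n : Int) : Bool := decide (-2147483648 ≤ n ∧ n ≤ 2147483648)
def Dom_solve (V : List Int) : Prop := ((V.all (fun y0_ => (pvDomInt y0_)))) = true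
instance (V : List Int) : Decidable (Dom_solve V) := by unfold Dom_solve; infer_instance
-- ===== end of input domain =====

-- B replaces A's clamped energy/deficit accumulator by the closed form max([0] + V) (simpler).

-- ===== PORT A =====
-- state (energy, last, ans) threaded through the loop, exactly as in A
def solve (V : List Int) : Int :=
  (V.foldl (fun (s : Int × Int × Int) x =>
      let energy := s.1 + s.2.1 - x
      let ans := s.2.2 + max 0 (-energy)
      (max 0 energy, x, ans)) (0, 0, 0)).2.2

-- ===== PORT B =====
-- max([0] + V): Python's max scans left to right keeping the running maximum
def solve_alt (V : List Int) : Int := V.foldl max 0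

-- ===== PRECONDITION & SPEC =====
def Spec_solve (V : List Int) (out : Int) : Prop := out = solve_alt V
instance (V : List Int) (out : Int) : Decidable (Spec_solve V out) := by unfold Spec_solve; infer_instance

-- ===== CLAIM (what is proved, stated in full; the proofs are below) =====
def Claim_equal_solve : Prop := ∀ (V : List Int), Dom_solve V → Spec_solve V (solve V)

-- ===== LEMMAS AND PROOFS =====

-- Loop invariant: energy = ans - last; the answer component is the running max.
theorem solve_invariant (V : List Int) : ∀ (l a : Int),
    (V.foldl (fun (s : Int × Int × Int) x =>
      let energy := s.1 + s.2.1 - x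
      let ans := s.2.2 + max 0 (-energy)
      (max 0 energy, x, ans)) (a - l, l, a)).2.2 = V.foldl max a := by
  induction V with
  | nil => intro l a; rfl
  | cons x t ih =>
    intro l a
    simp only [List.foldl_cons]
    have h2 : a + max 0 (-(a - l + l - x)) = max a x := by omega
    have h3 : max 0 (a - l + l - x) = max a x - x := by omega
    rw [h2, h3]
    exact ih x (max a x)

-- ===== VERDICT (by name: the statement is the Claim_ definition above) =====
theorem solve_spec : Claim_equal_solve := by
  intro V _
  unfold Spec_solve solve solve_alt
  have := solve_invariant V 0 0
  simpa using this
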